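-- pv_equiv track=rewrite | github.com/selfreferencing/erdos-86-lean | test_uncovered_classes.py | find_witness
-- ===== SOURCE A (Python) =====
-- from math import gcd
--
-- def factor(n):
--     if n <= 1:
--         return []
--     factors = []
--     d = 2
--     while d * d <= n:
--         if n % d == 0:
--             e = 0
--             while n % d == 0:
--                 e += 1
--                 n //= d
--             factors.append((d, e))
--         d += 1 if d == 2 else 2
--     if n > 1:
--         factors.append((n, 1))
--     return factors
--
-- def divisors_of_square(n):
--     facts = factor(n)
--     divs = [1]
--     for p, e in facts:
--         new_divs = []
--         for d in divs:
--             power = 1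
--             for i in range(2*e + 1):
--                 new_divs.append(d * power)
--                 power *= p
--         divs = new_divs
--     return sorted(divs)
--
-- def find_witness(p, k):
--     """Find a Type II witness d for p at k."""
--     m_k = 4 * k + 3
--     if (p + m_k) % 4 != 0:
--         return None
--     x_k = (p + m_k) // 4
--     if gcd(x_k, m_k) > 1:
--         return None
--     target = (-x_k) % m_k
--     divs = divisors_of_square(x_k)
--     for d in divs:
--         if d % m_k == target:
--             return (k, d, x_k, m_k)
--     return None
-- ===== SOURCE B (Python) =====
-- from math import gcd, isqrt
--
-- def find_witness(p, k):
--     """Find a Type II witness d for p at k."""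
--     m_k = 4 * k + 3
--     if (p + m_k) % 4 != 0:
--         return None
--     x_k = (p + m_k) // 4
--     if gcd(x_k, m_k) > 1:
--         return None
--     target = (-x_k) % m_k
--     n = abs(x_k)
--     small = [i for i in range(1, isqrt(n) + 1) if n % i == 0]
--     divs_n = set(small) | {n // i for i in small}
--     square_divs = {a * b for a in divs_n for b in divs_n}
--     for d in sorted(square_divs):
--         if d % m_k == target:
--             return (k, d, x_k, m_k)
--     return None
-- ===== Notes on version B (the rewrite author's own statement) =====
-- stated objective: simpler
-- what changed: B drops the prime-factorization + cartesian-product divisor generation and instead enumerates the divisors of |x_k| by trial division up to isqrt and forms the divisors of x_k^2 as pairwise products, scanning them in sorted order; guards and target computation are unchanged.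
-- intended difference: On inputs passing both guards with x_k <= 0 (never reached in the intended use, p prime and k >= 0): A's factor() returns [] for any n <= 1, so A searches the bogus divisor list [1] and returns None unless 1 % m_k == target (and (1,-1) where it returns (-1,1,0,-1)); B searches the actual divisors of x_k^2 and returns the smallest one congruent to target mod m_k (always one exists, d = -x_k), which is the documented intent. — e.g. on find_witness(-11, 0): A returns none, B returns some (0, 2, -2, 3)
import Mathlib
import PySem

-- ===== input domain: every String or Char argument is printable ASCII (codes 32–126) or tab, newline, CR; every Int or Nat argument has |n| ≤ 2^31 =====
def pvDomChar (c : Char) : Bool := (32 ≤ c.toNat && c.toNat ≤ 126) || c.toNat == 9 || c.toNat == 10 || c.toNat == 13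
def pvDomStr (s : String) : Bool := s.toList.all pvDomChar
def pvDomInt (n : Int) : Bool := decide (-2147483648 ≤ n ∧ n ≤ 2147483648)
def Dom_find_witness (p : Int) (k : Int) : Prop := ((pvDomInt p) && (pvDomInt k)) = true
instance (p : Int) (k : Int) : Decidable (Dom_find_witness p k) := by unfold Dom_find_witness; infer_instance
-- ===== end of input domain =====

-- B replaces A's prime-factorization + cartesian-product divisor generation by direct
-- trial-division divisor enumeration of |x_k| plus pairwise products (objective: simpler);
-- on the never-intended inputs with x_k ≤ 0 (D_ below) B returns the actual smallest
-- matching divisor of x_k² where A scans the bogus divisor list [1].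

-- ===== PORT A =====

-- termination lemma for factorPull (cited in its decreasing_by)
theorem pv_pull_dec (n d : Int) (h : 2 ≤ d ∧ 1 ≤ n ∧ PySem.Int.mod n d = 0) :
    (PySem.Int.floordiv n d).toNat < n.toNat := by
  rcases h with ⟨hd, hn, hm⟩
  have hdvd : d ∣ n := (PySem.Int.mod_eq_zero_iff_dvd n d).mp hm
  rw [PySem.Int.floordiv_eq_ediv_of_pos (by omega)]
  rcases hdvd with ⟨c, rfl⟩
  have hc1 : 1 ≤ c := by nlinarith
  have h1 : d * c / d = c := Int.mul_ediv_cancel_left _ (by omega)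
  have h2 : c < d * c := by nlinarith
  omega

-- inner 'while n % d == 0: e += 1; n //= d' of factor (the '2 ≤ d ∧ 1 ≤ n' conjuncts
-- only make the recursion total; they hold on every state A's code reaches)
def factorPull (n : Int) (d : Int) (e : Int) : Int × Int :=
  if h : 2 ≤ d ∧ 1 ≤ n ∧ PySem.Int.mod n d = 0 then
    factorPull (PySem.Int.floordiv n d) d (e + 1)
  else (e, n)
termination_by n.toNat
decreasing_by exact pv_pull_dec n d h

-- loop invariant of factorPull (cited by factorLoop's decreasing_by, hence above the port)
theorem factorPull_spec (n d e : Int) (hn : 1 ≤ n) (hd : 2 ≤ d) :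
    ∃ j : Nat, (factorPull n d e).1 = e + j ∧ n = (factorPull n d e).2 * d ^ j ∧
      1 ≤ (factorPull n d e).2 ∧ ¬ (d ∣ (factorPull n d e).2) ∧
      (PySem.Int.mod n d = 0 → 1 ≤ j) := by
  fun_induction factorPull n d e with
  | case1 n e h ih =>
    obtain ⟨hd', hn', hm⟩ := h
    have hdvd : d ∣ n := (PySem.Int.mod_eq_zero_iff_dvd n d).mp hm
    obtain ⟨c, rfl⟩ := hdvd
    have hc1 : 1 ≤ c := by nlinarith
    have hq2 : PySem.Int.floordiv (d * c) d = c := by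
      rw [PySem.Int.floordiv_eq_ediv_of_pos (by omega)]
      exact Int.mul_ediv_cancel_left _ (by omega)
    rw [hq2] at ih ⊢
    obtain ⟨j, hj1, hj2, hj3, hj4, _⟩ := ih hc1
    exact ⟨j + 1, by rw [hj1]; push_cast; ring, by rw [pow_succ]; nlinarith [hj2], hj3, hj4,
      by omega⟩
  | case2 n e h =>
    refine ⟨0, by simp, by simp, hn, fun hdvd => ?_, fun hm => absurd ⟨hd, hn, hm⟩ h⟩
    exact h ⟨hd, hn, (PySem.Int.mod_eq_zero_iff_dvd n d).mpr hdvd⟩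

theorem factorPull_half (n d : Int) (hn : 1 ≤ n) (hd : 2 ≤ d)
    (hm : PySem.Int.mod n d = 0) :
    2 * (factorPull n d 0).2 ≤ n ∧ 1 ≤ (factorPull n d 0).2 := by
  obtain ⟨j, _, hj2, hj3, _, hj5⟩ := factorPull_spec n d 0 hn hd
  have hj1 : 1 ≤ j := hj5 hm
  have hpow : (2:Int) ≤ d ^ j := by
    calc (2:Int) = 2 ^ 1 := by norm_num
      _ ≤ 2 ^ j := by exact pow_le_pow_right₀ (by norm_num) hj1
      _ ≤ d ^ j := by exact pow_le_pow_left₀ (by norm_num) hd j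
  exact ⟨by nlinarith [hj2, hj3], hj3⟩

-- termination lemmas for factorLoop (cited in its decreasing_by)
theorem pv_loop_dec1 (n d : Int) (h : 2 ≤ d ∧ 1 ≤ n ∧ d * d ≤ n)
    (hm : PySem.Int.mod n d = 0) :
    (2 * (factorPull n d 0).2 - (d + if d = 2 then 1 else 2)).toNat < (2 * n - d).toNat := by
  rcases h with ⟨hd, hn, hdd⟩
  have := factorPull_half n d hn hd hm
  have hn4 : 4 ≤ n := by nlinarith
  have hdn : d ≤ n := by nlinarith
  split <;> omega

theorem pv_loop_dec2 (n d : Int) (h : 2 ≤ d ∧ 1 ≤ n ∧ d * d ≤ n) :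
    (2 * n - (d + if d = 2 then 1 else 2)).toNat < (2 * n - d).toNat := by
  rcases h with ⟨hd, hn, hdd⟩
  have : d < n := by nlinarith
  split <;> omega

-- outer trial-division loop of factor (again, '2 ≤ d ∧ 1 ≤ n' only totalizes; both hold
-- whenever A's loop runs, and 'd*d ≤ n' is exactly A's loop condition)
def factorLoop (n : Int) (d : Int) (acc : List (Int × Int)) : List (Int × Int) :=
  if h : 2 ≤ d ∧ 1 ≤ n ∧ d * d ≤ n then
    if hm : PySem.Int.mod n d = 0 then
      factorLoop (factorPull n d 0).2 (d + if d = 2 then 1 else 2)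
        (acc ++ [(d, (factorPull n d 0).1)])
    else
      factorLoop n (d + if d = 2 then 1 else 2) acc
  else if 1 < n then acc ++ [(n, 1)] else acc
termination_by (2 * n - d).toNat
decreasing_by
  · exact pv_loop_dec1 n d h hm
  · exact pv_loop_dec2 n d h

def factor (n : Int) : List (Int × Int) :=
  if n ≤ 1 then [] else factorLoop n 2 []

def divisors_of_square (n : Int) : List Int :=
  let facts := factor n
  let divs := facts.foldl
    (fun divs pe =>
      divs.foldl
        (fun new_divs d =>
          ((PySem.List.pyRange 0 (2 * pe.2 + 1) 1).foldl
            (fun (st : List Int × Int) _ => (st.1 ++ [d * st.2], st.2 * pe.1))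
            (new_divs, 1)).1)
        [])
    [1]
  PySem.List.sorted divs (fun x => x) false

def find_witness (p : Int) (k : Int) : Option (Int × Int × Int × Int) :=
  let m_k := 4 * k + 3
  if PySem.Int.mod (p + m_k) 4 ≠ 0 then none
  else
    let x_k := PySem.Int.floordiv (p + m_k) 4
    if 1 < (Int.gcd x_k m_k : Int) then none
    else
      let target := PySem.Int.mod (-x_k) m_k
      let divs := divisors_of_square x_k
      (divs.find? (fun d => PySem.Int.mod d m_k == target)).map (fun d => (k, d, x_k, m_k))

-- ===== PORT B =====

-- math.isqrt (for n ≥ 0), ported by hand: ascending search, fuel-bounded structural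
-- recursion; exact — see isqrt_spec below
def isqrtAux (n : Nat) : Nat → Nat → Nat
  | fuel+1, i => if (i+1)*(i+1) ≤ n then isqrtAux n fuel (i+1) else i
  | 0, i => i
def isqrt (n : Nat) : Nat := isqrtAux n n 0

def find_witness_alt (p : Int) (k : Int) : Option (Int × Int × Int × Int) :=
  let m_k := 4 * k + 3
  if PySem.Int.mod (p + m_k) 4 ≠ 0 then none
  else
    let x_k := PySem.Int.floordiv (p + m_k) 4
    if 1 < (Int.gcd x_k m_k : Int) then none
    else
      let target := PySem.Int.mod (-x_k) m_k
      let n := |x_k|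
      let small := (PySem.List.pyRange 1 ((isqrt n.toNat : Int) + 1) 1).filter
        (fun i => PySem.Int.mod n i == 0)
      let divs_n := PySem.Set.union (PySem.Set.ofList small)
        (small.map (fun i => PySem.Int.floordiv n i))
      let square_divs := PySem.Set.ofList
        (divs_n.flatMap (fun a => divs_n.map (fun b => a * b)))
      ((PySem.List.sorted square_divs (fun x => x) false).find?
        (fun d => PySem.Int.mod d m_k == target)).map (fun d => (k, d, x_k, m_k))

-- ===== PRECONDITION & SPEC =====
-- On inputs that pass both guards with x_k ≤ 0 (outside the intended use, p prime and
-- k ≥ 0): A's factor() yields [] for any n ≤ 1, so A scans the bogus divisor list [1]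
-- and returns None unless 1 % m_k == target (and, at (p,k) = (1,-1), (-1,1,0,-1));
-- B scans the actual divisors of x_k² and returns the smallest one congruent to
-- target mod m_k (one always exists there, namely -x_k), which is the intended value.
def D_find_witness (p : Int) (k : Int) : Prop :=
  PySem.Int.mod (p + (4 * k + 3)) 4 = 0 ∧
  (Int.gcd (PySem.Int.floordiv (p + (4 * k + 3)) 4) (4 * k + 3) : Int) ≤ 1 ∧
  ((PySem.Int.floordiv (p + (4 * k + 3)) 4 = 0 ∧ 4 * k + 3 = -1) ∨
   (PySem.Int.floordiv (p + (4 * k + 3)) 4 ≤ -1 ∧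
    PySem.Int.mod 1 (4 * k + 3) ≠
      PySem.Int.mod (-(PySem.Int.floordiv (p + (4 * k + 3)) 4)) (4 * k + 3)))
instance (p : Int) (k : Int) : Decidable (D_find_witness p k) := by
  unfold D_find_witness; infer_instance

def Spec_find_witness (p : Int) (k : Int) (out : Option (Int × Int × Int × Int)) : Prop :=
  ¬ D_find_witness p k → out = find_witness_alt p k
instance (p : Int) (k : Int) (out : Option (Int × Int × Int × Int)) :
    Decidable (Spec_find_witness p k out) := by unfold Spec_find_witness; infer_instance

def pvDiffWitness_find_witness : Int × Int := (-11, 0)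
def pvDiffWitnessOut_find_witness :
    (Option (Int × Int × Int × Int)) × (Option (Int × Int × Int × Int)) :=
  (none, some (0, 2, -2, 3))

-- ===== CLAIM (what is proved, stated in full; the proofs are below) =====
def Claim_unchanged_find_witness : Prop :=
  ∀ (p : Int) (k : Int), Dom_find_witness p k → Spec_find_witness p k (find_witness p k)
def Claim_changed_find_witness : Prop :=
  Dom_find_witness (pvDiffWitness_find_witness.1) (pvDiffWitness_find_witness.2) ∧
  D_find_witness (pvDiffWitness_find_witness.1) (pvDiffWitness_find_witness.2) ∧
  find_witness (pvDiffWitness_find_witness.1) (pvDiffWitness_find_witness.2) = pvDiffWitnessOut_find_witness.1 ∧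
  find_witness_alt (pvDiffWitness_find_witness.1) (pvDiffWitness_find_witness.2) = pvDiffWitnessOut_find_witness.2 ∧
  pvDiffWitnessOut_find_witness.1 ≠ pvDiffWitnessOut_find_witness.2
def Claim_exact_find_witness : Prop :=
  ∀ (p : Int) (k : Int), Dom_find_witness p k → D_find_witness p k →
    find_witness p k ≠ find_witness_alt p k

-- ===== LEMMAS AND PROOFS =====

-- ----- generic find? lemmas on sorted lists -----

theorem pv_find?_min {l : List Int} {p : Int → Bool} {a : Int}
    (hs : l.Pairwise (· ≤ ·)) (ha : a ∈ l) (hpa : p a = true)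
    (hmin : ∀ b ∈ l, p b = true → a ≤ b) : l.find? p = some a := by
  induction l with
  | nil => cases ha
  | cons h t ih =>
    by_cases php : p h = true
    · have h1 : a ≤ h := hmin h (List.mem_cons_self) php
      have h2 : h ≤ a := by
        rcases List.mem_cons.mp ha with rfl | hat
        · exact le_refl _
        · exact (List.pairwise_cons.mp hs).1 a hat
      obtain rfl : h = a := le_antisymm h2 h1
      exact List.find?_cons_of_pos php
    · have hat : a ∈ t := by
        rcases List.mem_cons.mp ha with rfl | hat
        · exact absurd hpa php
        · exact hat
      rw [List.find?_cons_of_neg (by simpa using php)]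
      exact ih (List.pairwise_cons.mp hs).2 hat
        (fun b hb hpb => hmin b (List.mem_cons_of_mem _ hb) hpb)

theorem pv_find?_le {l : List Int} {p : Int → Bool} {a : Int}
    (hs : l.Pairwise (· ≤ ·)) (hf : l.find? p = some a) :
    ∀ b ∈ l, p b = true → a ≤ b := by
  induction l with
  | nil => simp at hf
  | cons h t ih =>
    by_cases php : p h = true
    · rw [List.find?_cons_of_pos php] at hf
      obtain rfl : h = a := by injection hf
      intro b hb _
      rcases List.mem_cons.mp hb with rfl | hbt
      · exact le_refl _
      · exact (List.pairwise_cons.mp hs).1 b hbt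
    · rw [List.find?_cons_of_neg (by simpa using php)] at hf
      intro b hb hpb
      rcases List.mem_cons.mp hb with rfl | hbt
      · exact absurd hpb php
      · exact ih (List.pairwise_cons.mp hs).2 hf b hbt hpb

theorem pv_find?_congr {l₁ l₂ : List Int} (h₁ : l₁.Pairwise (· ≤ ·))
    (h₂ : l₂.Pairwise (· ≤ ·)) (hm : ∀ d, d ∈ l₁ ↔ d ∈ l₂) (p : Int → Bool) :
    l₁.find? p = l₂.find? p := by
  cases hf : l₁.find? p with
  | none =>
    cases hf2 : l₂.find? p with
    | none => rfl
    | some a =>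
      have ha := List.mem_of_find?_eq_some hf2
      have := List.find?_eq_none.mp hf a ((hm a).mpr ha)
      exact absurd (List.find?_some hf2) this
  | some a =>
    have ha : a ∈ l₂ := (hm a).mp (List.mem_of_find?_eq_some hf)
    have hpa := List.find?_some hf
    have hmin : ∀ b ∈ l₂, p b = true → a ≤ b := fun b hb hpb =>
      pv_find?_le h₁ hf b ((hm b).mpr hb) hpb
    exact (pv_find?_min h₂ ha hpa hmin).symm


-- ----- A side: the trial-division loop produces the prime factorization -----

def prodF (F : List (Int × Int)) : Int := F.foldr (fun pe r => pe.1 ^ pe.2.toNat * r) 1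

def GoodF (F : List (Int × Int)) : Prop :=
  ∀ pe ∈ F, 2 ≤ pe.1 ∧ 0 ≤ pe.2 ∧ pe.1.natAbs.Prime

theorem prodF_pos (F : List (Int × Int)) (h : ∀ pe ∈ F, 2 ≤ pe.1) : 1 ≤ prodF F := by
  induction F with
  | nil => simp [prodF]
  | cons pe F ih =>
    have h1 : (1:Int) ≤ pe.1 ^ pe.2.toNat :=
      one_le_pow₀ (by have := h pe List.mem_cons_self; omega)
    have h2 := ih (fun q hq => h q (List.mem_cons_of_mem _ hq))
    simp only [prodF, List.foldr_cons] at *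
    nlinarith

theorem prime_of_no_small_divisor (n d : Int) (hn : 2 ≤ n) (hd : 2 ≤ d) (hdd : n < d * d)
    (hinv : ∀ q : Int, 2 ≤ q → q < d → ¬ q ∣ n) : n.natAbs.Prime := by
  rw [Nat.prime_def_lt]
  refine ⟨by omega, fun m hm hdvd => ?_⟩
  by_contra hm1
  have hm0 : m ≠ 0 := by rintro rfl; simp at hdvd; omega
  have hm2 : 2 ≤ m := by omega
  have hdvdZ : (m : Int) ∣ n := by
    have := Int.natCast_dvd_natCast.mpr hdvd
    rwa [Int.natAbs_of_nonneg (by omega)] at this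
  by_cases hmd : (m : Int) < d
  · exact hinv m (by exact_mod_cast hm2) hmd hdvdZ
  · obtain ⟨c, hc⟩ := hdvdZ
    have hmBig : d ≤ (m : Int) := by omega
    have hc1 : 1 ≤ c := by nlinarith
    have hcd : c < d := by nlinarith
    have hc2 : 2 ≤ c := by
      rcases lt_or_ge c 2 with h' | h'
      · obtain rfl : c = 1 := by omega
        simp at hc
        omega
      · exact h'
    exact hinv c hc2 hcd ⟨m, by linarith [hc]⟩

theorem prime_of_min_divisor (d n : Int) (hd : 2 ≤ d) (hdvd : d ∣ n) (hn : 1 ≤ n)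
    (hinv : ∀ q : Int, 2 ≤ q → q < d → ¬ q ∣ n) : d.natAbs.Prime := by
  rw [Nat.prime_def_lt]
  refine ⟨by omega, fun m hm hmdvd => ?_⟩
  by_contra hm1
  have hm0 : m ≠ 0 := by rintro rfl; simp at hmdvd; omega
  have hm2 : 2 ≤ m := by omega
  have h1 : (m : Int) ∣ d := by
    have := Int.natCast_dvd_natCast.mpr hmdvd
    rwa [Int.natAbs_of_nonneg (by omega)] at this
  have h2 : (m : Int) < d := by
    have : (m : Int) < (d.natAbs : Int) := by exact_mod_cast hm
    omega
  exact hinv m (by exact_mod_cast hm2) h2 (h1.trans hdvd)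

theorem factorLoop_spec (n d : Int) (acc : List (Int × Int)) (hn : 1 ≤ n) (hd : 2 ≤ d)
    (hpar : d = 2 ∨ d % 2 = 1)
    (hinv : ∀ q : Int, 2 ≤ q → q < d → ¬ q ∣ n) :
    ∃ F, factorLoop n d acc = acc ++ F ∧ prodF F = n ∧ GoodF F := by
  fun_induction factorLoop n d acc with
  | case1 n d acc h hm ih =>
    simp only [dite_eq_ite] at ih ⊢
    obtain ⟨hd', hn', hdd⟩ := h
    have hdvd : d ∣ n := (PySem.Int.mod_eq_zero_iff_dvd n d).mp hm
    obtain ⟨j, hj1, hj2, hj3, hj4, hj5⟩ := factorPull_spec n d 0 hn' hd'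
    have hjpos : 1 ≤ j := hj5 hm
    have hprime : d.natAbs.Prime := prime_of_min_divisor d n hd' hdvd hn' hinv
    have hinv' : ∀ q : Int, 2 ≤ q → q < d + (if d = 2 then 1 else 2) →
        ¬ q ∣ (factorPull n d 0).2 := by
      intro q hq2 hqlt hqdvd
      have hqn : q ∣ n → False := fun hh => by
        rcases lt_trichotomy q d with h' | h' | h'
        · exact hinv q hq2 h' hh
        · subst h'; exact hj4 hqdvd
        · -- q = d+1, d odd
          have hd2 : d ≠ 2 := by
            rintro rfl
            simp at hqlt
            omega
          rw [if_neg hd2] at hqlt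
          have hdodd : d % 2 = 1 := by rcases hpar with h'' | h''; omega; exact h''
          have hq : q = d + 1 := by omega
          have h2q : (2:Int) ∣ q := by omega
          have h2n : (2:Int) ∣ n := dvd_trans h2q hh
          exact hinv 2 (by norm_num) (by omega) h2n
      exact hqn (by rw [hj2]; exact Dvd.dvd.mul_right hqdvd _)
    have hpar' : d + (if d = 2 then 1 else 2) = 2 ∨ (d + (if d = 2 then 1 else 2)) % 2 = 1 := by
      right
      by_cases hd2 : d = 2
      · simp [hd2]
      · rw [if_neg hd2]
        rcases hpar with h' | h'; omega; omega
    obtain ⟨F', hF1, hF2, hF3⟩ := ih hj3 (by split <;> omega) hpar' hinv'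
    refine ⟨(d, (factorPull n d 0).1) :: F', ?_, ?_, ?_⟩
    · rw [hF1, List.append_assoc]; rfl
    · simp only [prodF, List.foldr_cons] at hF2 ⊢
      rw [hF2, hj1]
      have hto : ((0 : Int) + (j:Int)).toNat = j := by omega
      rw [hto]
      conv_rhs => rw [hj2]
      ring
    · intro pe hpe
      rcases List.mem_cons.mp hpe with rfl | hpe'
      · exact ⟨hd', by simp [hj1], hprime⟩
      · exact hF3 pe hpe'
  | case2 n d acc h hm ih =>
    simp only [dite_eq_ite] at ih ⊢
    obtain ⟨hd', hn', hdd⟩ := h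
    have hndvd : ¬ d ∣ n := fun hh => hm ((PySem.Int.mod_eq_zero_iff_dvd n d).mpr hh)
    have hinv' : ∀ q : Int, 2 ≤ q → q < d + (if d = 2 then 1 else 2) → ¬ q ∣ n := by
      intro q hq2 hqlt hqdvd
      rcases lt_trichotomy q d with h' | h' | h'
      · exact hinv q hq2 h' hqdvd
      · subst h'; exact hndvd hqdvd
      · have hd2 : d ≠ 2 := by
          rintro rfl
          simp at hqlt
          omega
        rw [if_neg hd2] at hqlt
        have hdodd : d % 2 = 1 := by rcases hpar with h'' | h''; omega; exact h''
        have h2q : (2:Int) ∣ q := by omega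
        have h2n : (2:Int) ∣ n := dvd_trans h2q hqdvd
        exact hinv 2 (by norm_num) (by omega) h2n
    have hpar' : d + (if d = 2 then 1 else 2) = 2 ∨ (d + (if d = 2 then 1 else 2)) % 2 = 1 := by
      right
      by_cases hd2 : d = 2
      · simp [hd2]
      · rw [if_neg hd2]; rcases hpar with h' | h'; omega; omega
    exact ih hn' (by split <;> omega) hpar' hinv'
  | case3 n d acc h h1 =>
    have hndd : n < d * d := by
      by_contra h'
      exact h ⟨hd, hn, by omega⟩
    refine ⟨[(n, 1)], rfl, by simp [prodF], ?_⟩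
    intro pe hpe
    rcases List.mem_cons.mp hpe with rfl | hpe'
    · exact ⟨by omega, by norm_num, prime_of_no_small_divisor n d (by omega) hd hndd hinv⟩
    · cases hpe'
  | case4 n d acc h h1 =>
    obtain rfl : n = 1 := by omega
    exact ⟨[], by simp, by simp [prodF], by intro pe hpe; cases hpe⟩

theorem factor_spec (n : Int) (hn : 1 ≤ n) :
    prodF (factor n) = n ∧ GoodF (factor n) := by
  by_cases h1 : n ≤ 1
  · obtain rfl : n = 1 := by omega
    simp [factor, prodF, GoodF]
  · rw [factor, if_neg h1]
    obtain ⟨F, hF1, hF2, hF3⟩ := factorLoop_spec n 2 [] (by omega) (by omega) (Or.inl rfl)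
      (by intro q hq2 hq; omega)
    rw [hF1, List.nil_append]
    exact ⟨hF2, hF3⟩


-- ----- A side: membership of the generated divisor list -----

def RepD : List (Int × Int) → Int → Prop
  | [], x => x = 1
  | pe :: F, x => ∃ i : Nat, i ≤ 2 * pe.2.toNat ∧ ∃ r, RepD F r ∧ x = pe.1 ^ i * r

theorem pv_powFold (d p : Int) : ∀ (l : List Int) (L : List Int) (q : Int),
    l.foldl (fun st _ => (st.1 ++ [d * st.2], st.2 * p)) (L, q)
      = (L ++ (List.range l.length).map (fun i => d * (q * p ^ i)), q * p ^ l.length) := by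
  intro l
  induction l with
  | nil => intro L q; simp
  | cons a t ih =>
    intro L q
    rw [List.foldl_cons, ih]
    refine Prod.ext ?_ ?_
    · show (L ++ [d * q]) ++ _ = L ++ _
      rw [List.append_assoc]
      congr 1
      rw [List.length_cons, List.range_succ_eq_map, List.map_cons, List.map_map]
      simp only [pow_zero, mul_one, List.singleton_append, List.cons.injEq]
      refine ⟨by trivial, List.map_congr_left ?_⟩
      intro i _
      show d * (q * p * p ^ i) = d * (q * p ^ (i + 1))
      rw [pow_succ]
      ring
    · show q * p * p ^ t.length = q * p ^ (t.length + 1)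
      rw [pow_succ]
      ring

theorem pv_mem_step (divs : List Int) (p e : Int) (he : 0 ≤ e) (x : Int) :
    (x ∈ divs.foldl
      (fun new_divs d =>
        ((PySem.List.pyRange 0 (2 * e + 1) 1).foldl
          (fun (st : List Int × Int) _ => (st.1 ++ [d * st.2], st.2 * p))
          (new_divs, 1)).1)
      []) ↔ ∃ d0 ∈ divs, ∃ i : Nat, i ≤ 2 * e.toNat ∧ x = d0 * p ^ i := by
  have hc : (PySem.List.pyRange 0 (2 * e + 1) 1).length = 2 * e.toNat + 1 := by
    rw [PySem.List.length_pyRange_one]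
    omega
  have hfun : ∀ (nd : List Int) (d : Int),
      ((PySem.List.pyRange 0 (2 * e + 1) 1).foldl
        (fun (st : List Int × Int) _ => (st.1 ++ [d * st.2], st.2 * p)) (nd, 1)).1
      = nd ++ (List.range (2 * e.toNat + 1)).map (fun i => d * (1 * p ^ i)) := by
    intro nd d
    rw [pv_powFold, hc]
  rw [List.foldl_ext _ _ [] (fun nd d _ => hfun nd d)]
  rw [PySem.List.foldl_append_eq_flatMap, List.nil_append]
  simp only [List.mem_flatMap, List.mem_map, List.mem_range]
  constructor
  · rintro ⟨d0, hd0, i, hi, rfl⟩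
    exact ⟨d0, hd0, i, by omega, by ring⟩
  · rintro ⟨d0, hd0, i, hi, rfl⟩
    exact ⟨d0, hd0, i, by omega, by ring⟩

theorem pv_mem_divsFold (F : List (Int × Int)) :
    ∀ (divs0 : List Int) (x : Int), (∀ pe ∈ F, 0 ≤ pe.2) →
    (x ∈ F.foldl
      (fun divs pe =>
        divs.foldl
          (fun new_divs d =>
            ((PySem.List.pyRange 0 (2 * pe.2 + 1) 1).foldl
              (fun (st : List Int × Int) _ => (st.1 ++ [d * st.2], st.2 * pe.1))
              (new_divs, 1)).1)
          [])
      divs0 ↔ ∃ d0 ∈ divs0, ∃ r, RepD F r ∧ x = d0 * r) := by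
  induction F with
  | nil =>
    intro divs0 x _
    simp only [List.foldl_nil]
    constructor
    · intro hx; exact ⟨x, hx, 1, rfl, (mul_one x).symm⟩
    · rintro ⟨d0, hd0, r, hr, rfl⟩
      have hr1 : r = 1 := hr
      subst hr1; simpa using hd0
  | cons pe F ih =>
    intro divs0 x hF
    rw [List.foldl_cons]
    rw [ih _ x (fun q hq => hF q (List.mem_cons_of_mem _ hq))]
    constructor
    · rintro ⟨d1, hd1, r, hr, rfl⟩
      obtain ⟨d0, hd0, i, hi, rfl⟩ :=
        (pv_mem_step divs0 pe.1 pe.2 (hF pe List.mem_cons_self) d1 |>.mp hd1)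
      exact ⟨d0, hd0, pe.1 ^ i * r, ⟨i, hi, r, hr, rfl⟩, by ring⟩
    · rintro ⟨d0, hd0, r, ⟨i, hi, r', hr', rfl⟩, rfl⟩
      refine ⟨d0 * pe.1 ^ i, ?_, r', hr', by ring⟩
      exact (pv_mem_step divs0 pe.1 pe.2 (hF pe List.mem_cons_self) _).mpr
        ⟨d0, hd0, i, hi, rfl⟩


-- ----- A side: represented numbers are exactly the divisors of (prodF F)² -----

theorem pv_RepD_iff (F : List (Int × Int)) (hF : GoodF F) :
    ∀ x : Int, RepD F x ↔ (0 < x ∧ x ∣ prodF F * prodF F) := by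
  induction F with
  | nil =>
    intro x
    constructor
    · rintro (rfl : x = 1); exact ⟨one_pos, by simp [prodF]⟩
    · rintro ⟨hx0, hxd⟩
      simp only [prodF, List.foldr_nil, mul_one] at hxd
      exact Int.eq_one_of_dvd_one (by omega) hxd
  | cons pe F ih =>
    obtain ⟨hp2, he0, hprime⟩ := hF pe List.mem_cons_self
    have hFgood : GoodF F := fun q hq => hF q (List.mem_cons_of_mem _ hq)
    have ihF := ih hFgood
    have hN : 1 ≤ prodF F := prodF_pos F (fun q hq => (hFgood q hq).1)
    have hsq : prodF (pe :: F) * prodF (pe :: F)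
        = pe.1 ^ (2 * pe.2.toNat) * (prodF F * prodF F) := by
      simp only [prodF, List.foldr_cons]
      rw [two_mul, pow_add]
      ring
    intro x
    rw [hsq]
    constructor
    · rintro ⟨i, hi, r, hr, rfl⟩
      obtain ⟨hr0, hrd⟩ := (ihF r).mp hr
      refine ⟨mul_pos (pow_pos (by omega) i) hr0, ?_⟩
      exact mul_dvd_mul (pow_dvd_pow pe.1 hi) hrd
    · rintro ⟨hx0, hxd⟩
      have hXd : x.natAbs ∣ (pe.1.natAbs) ^ (2 * pe.2.toNat) * (prodF F * prodF F).natAbs := by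
        have h1 := Int.natAbs_dvd_natAbs.mpr hxd
        rwa [Int.natAbs_mul, Int.natAbs_pow] at h1
      obtain ⟨u, v, hu, hv, huv⟩ := exists_dvd_and_dvd_of_dvd_mul hXd
      obtain ⟨c, hcle, hueq⟩ := (Nat.dvd_prime_pow hprime).mp hu
      have hv0 : 0 < v := by
        rcases Nat.eq_zero_or_pos v with rfl | h'
        · exfalso; omega
        · exact h'
      have hvd : (v : Int) ∣ prodF F * prodF F := by
        have h1 := Int.natCast_dvd_natCast.mpr hv
        rwa [Int.natAbs_of_nonneg (by positivity)] at h1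
      have hrep : RepD F (v : Int) := (ihF _).mpr ⟨by exact_mod_cast hv0, hvd⟩
      refine ⟨c, hcle, (v : Int), hrep, ?_⟩
      have hx : x = (x.natAbs : Int) := (Int.natAbs_of_nonneg (by omega)).symm
      rw [hx, huv, hueq]
      push_cast
      rw [abs_of_pos (by omega : (0:Int) < pe.1)]

theorem pv_A_mem (x : Int) (hx : 1 ≤ x) (d : Int) :
    d ∈ divisors_of_square x ↔ (0 < d ∧ d ∣ x * x) := by
  obtain ⟨hprod, hgood⟩ := factor_spec x hx
  simp only [divisors_of_square]
  rw [PySem.List.mem_sorted]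
  rw [pv_mem_divsFold (factor x) [1] d (fun pe hpe => (hgood pe hpe).2.1)]
  constructor
  · rintro ⟨d0, hd0, r, hr, rfl⟩
    obtain rfl : d0 = 1 := by simpa using hd0
    rw [one_mul]
    have h1 := (pv_RepD_iff (factor x) hgood r).mp hr
    rwa [hprod] at h1
  · intro h
    rw [← hprod] at h
    exact ⟨1, by simp, d, (pv_RepD_iff (factor x) hgood d).mpr h, (one_mul d).symm⟩

theorem pv_A_sorted (x : Int) : (divisors_of_square x).Pairwise (· ≤ ·) := by
  simp only [divisors_of_square]
  exact PySem.List.sorted_pairwise _ _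


-- ----- B side: the trial-division divisor list -----

theorem isqrtAux_spec (n : Nat) : ∀ fuel i, i * i ≤ n → n < (i + fuel + 1) * (i + fuel + 1) →
    (isqrtAux n fuel i) * (isqrtAux n fuel i) ≤ n ∧
      n < (isqrtAux n fuel i + 1) * (isqrtAux n fuel i + 1) := by
  intro fuel
  induction fuel with
  | zero => intro i h1 h2; simpa [isqrtAux] using ⟨h1, by omega⟩
  | succ m ih =>
    intro i h1 h2
    rw [isqrtAux]
    split
    · exact ih (i + 1) (by omega) (by ring_nf; ring_nf at h2; omega)
    · omega

theorem isqrt_spec (n : Nat) : (isqrt n) * (isqrt n) ≤ n ∧ n < (isqrt n + 1) * (isqrt n + 1) :=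
  isqrtAux_spec n n 0 (by omega) (by nlinarith)

theorem pv_B_small_mem (n : Int) (hn : 1 ≤ n) (i : Int) :
    i ∈ (PySem.List.pyRange 1 ((isqrt n.toNat : Int) + 1) 1).filter
        (fun j => PySem.Int.mod n j == 0) ↔
      1 ≤ i ∧ i ≤ (isqrt n.toNat : Int) ∧ i ∣ n := by
  rw [List.mem_filter, PySem.List.mem_pyRange_one]
  rw [beq_iff_eq, PySem.Int.mod_eq_zero_iff_dvd]
  constructor
  · rintro ⟨⟨h1, h2⟩, h3⟩; exact ⟨h1, by omega, h3⟩
  · rintro ⟨h1, h2, h3⟩; exact ⟨⟨h1, by omega⟩, h3⟩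

theorem pv_B_divs_mem (n : Int) (hn : 1 ≤ n) (a : Int) :
    a ∈ PySem.Set.union
        (PySem.Set.ofList ((PySem.List.pyRange 1 ((isqrt n.toNat : Int) + 1) 1).filter
          (fun j => PySem.Int.mod n j == 0)))
        (((PySem.List.pyRange 1 ((isqrt n.toNat : Int) + 1) 1).filter
          (fun j => PySem.Int.mod n j == 0)).map (fun i => PySem.Int.floordiv n i)) ↔
      (0 < a ∧ a ∣ n) := by
  rw [PySem.Set.mem_union, PySem.Set.mem_ofList, List.mem_map]
  have hsq := isqrt_spec n.toNat
  have hcast : ((n.toNat : Int)) = n := Int.toNat_of_nonneg (by omega)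
  constructor
  · rintro (hsmall | ⟨i, hi, rfl⟩)
    · obtain ⟨h1, _, h3⟩ := (pv_B_small_mem n hn a).mp hsmall
      exact ⟨by omega, h3⟩
    · obtain ⟨h1, _, h3⟩ := (pv_B_small_mem n hn i).mp hi
      obtain ⟨c, rfl⟩ := h3
      have hfd : PySem.Int.floordiv (i * c) i = c := by
        rw [PySem.Int.floordiv_eq_ediv_of_pos (by omega)]
        exact Int.mul_ediv_cancel_left _ (by omega)
      rw [hfd]
      exact ⟨by nlinarith, ⟨i, by ring⟩⟩
  · rintro ⟨ha0, c, hc⟩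
    have hc0 : 0 < c := by nlinarith
    by_cases hle : a ≤ (isqrt n.toNat : Int)
    · exact Or.inl ((pv_B_small_mem n hn a).mpr ⟨by omega, hle, c, hc⟩)
    · right
      have hnlt : n < ((isqrt n.toNat : Int) + 1) * ((isqrt n.toNat : Int) + 1) := by
        have := hsq.2
        have h' : (n.toNat : Int) < ((isqrt n.toNat : Int) + 1) * ((isqrt n.toNat : Int) + 1) := by
          exact_mod_cast this
        rwa [hcast] at h'
      have hcle : c ≤ (isqrt n.toNat : Int) := by
        by_contra hgt
        push Not at hgt
        have h2 : ((isqrt n.toNat : Int) + 1) * ((isqrt n.toNat : Int) + 1) ≤ a * c := by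
          have ha1 : (isqrt n.toNat : Int) + 1 ≤ a := by omega
          have hc1 : (isqrt n.toNat : Int) + 1 ≤ c := by omega
          nlinarith
        linarith [hc]
      refine ⟨c, (pv_B_small_mem n hn c).mpr ⟨by omega, hcle, a, by rw [hc]; ring⟩, ?_⟩
      rw [PySem.Int.floordiv_eq_ediv_of_pos (by omega)]
      rw [hc]
      exact Int.mul_ediv_cancel a (by omega)

theorem pv_B_mem (n : Int) (hn : 1 ≤ n) (d : Int) :
    d ∈ PySem.List.sorted
        (PySem.Set.ofList
          ((PySem.Set.union
            (PySem.Set.ofList ((PySem.List.pyRange 1 ((isqrt n.toNat : Int) + 1) 1).filter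
              (fun j => PySem.Int.mod n j == 0)))
            (((PySem.List.pyRange 1 ((isqrt n.toNat : Int) + 1) 1).filter
              (fun j => PySem.Int.mod n j == 0)).map (fun i => PySem.Int.floordiv n i))).flatMap
            (fun a => (PySem.Set.union
              (PySem.Set.ofList ((PySem.List.pyRange 1 ((isqrt n.toNat : Int) + 1) 1).filter
                (fun j => PySem.Int.mod n j == 0)))
              (((PySem.List.pyRange 1 ((isqrt n.toNat : Int) + 1) 1).filter
                (fun j => PySem.Int.mod n j == 0)).map (fun i => PySem.Int.floordiv n i))).map
              (fun b => a * b))))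
        (fun x => x) false ↔ (0 < d ∧ d ∣ n * n) := by
  rw [PySem.List.mem_sorted, PySem.Set.mem_ofList, List.mem_flatMap]
  constructor
  · rintro ⟨a, ha, hb⟩
    obtain ⟨b, hb', rfl⟩ := List.mem_map.mp hb
    obtain ⟨ha0, had⟩ := (pv_B_divs_mem n hn a).mp ha
    obtain ⟨hb0, hbd⟩ := (pv_B_divs_mem n hn b).mp hb'
    exact ⟨mul_pos ha0 hb0, mul_dvd_mul had hbd⟩
  · rintro ⟨hd0, hdd⟩
    have hXd : d.natAbs ∣ n.natAbs * n.natAbs := by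
      have h1 := Int.natAbs_dvd_natAbs.mpr hdd
      rwa [Int.natAbs_mul] at h1
    obtain ⟨u, v, hu, hv, huv⟩ := exists_dvd_and_dvd_of_dvd_mul hXd
    have hu0 : 0 < u := by
      rcases Nat.eq_zero_or_pos u with rfl | h' <;> [exfalso; exact h']
      omega
    have hv0 : 0 < v := by
      rcases Nat.eq_zero_or_pos v with rfl | h' <;> [exfalso; exact h']
      omega
    have hcu : ((u : Int)) ∣ n := by
      have h1 := Int.natCast_dvd_natCast.mpr hu
      rwa [Int.natAbs_of_nonneg (by omega)] at h1
    have hcv : ((v : Int)) ∣ n := by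
      have h1 := Int.natCast_dvd_natCast.mpr hv
      rwa [Int.natAbs_of_nonneg (by omega)] at h1
    refine ⟨(u : Int), (pv_B_divs_mem n hn _).mpr ⟨by exact_mod_cast hu0, hcu⟩, ?_⟩
    refine List.mem_map.mpr ⟨(v : Int), (pv_B_divs_mem n hn _).mpr ⟨by exact_mod_cast hv0, hcv⟩, ?_⟩
    have : d = (d.natAbs : Int) := (Int.natAbs_of_nonneg (by omega)).symm
    rw [this, huv]
    push_cast
    ring


-- ----- assembly -----

theorem pv_A_neg (x : Int) (hx : x ≤ 1) : divisors_of_square x = [1] := by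
  simp only [divisors_of_square, factor, if_pos hx, List.foldl_nil]
  rfl

theorem pv_B_sorted (xs : List Int) :
    (PySem.List.sorted xs (fun x => x) false).Pairwise (· ≤ ·) :=
  PySem.List.sorted_pairwise xs (fun x => x)

theorem pv_main (p k : Int) (hnD : ¬ D_find_witness p k) :
    find_witness p k = find_witness_alt p k := by
  by_cases h4 : PySem.Int.mod (p + (4 * k + 3)) 4 = 0
  case neg =>
    simp only [find_witness, find_witness_alt]
    rw [if_pos h4, if_pos h4]
  case pos =>
    by_cases hg : 1 < (Int.gcd (PySem.Int.floordiv (p + (4 * k + 3)) 4) (4 * k + 3) : Int)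
    case pos =>
      simp only [find_witness, find_witness_alt]
      rw [if_neg (not_not_intro h4), if_neg (not_not_intro h4), if_pos hg, if_pos hg]
    case neg =>
      rcases le_or_gt 1 (PySem.Int.floordiv (p + (4 * k + 3)) 4) with hx1 | hx0
      · -- the intended domain: x_k ≥ 1
        simp only [find_witness, find_witness_alt]
        rw [if_neg (not_not_intro h4), if_neg (not_not_intro h4), if_neg hg, if_neg hg]
        congr 1
        have habs : |PySem.Int.floordiv (p + (4 * k + 3)) 4| =
            PySem.Int.floordiv (p + (4 * k + 3)) 4 := abs_of_pos (by omega)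
        rw [habs]
        apply pv_find?_congr (pv_A_sorted _) (pv_B_sorted _)
        intro d
        rw [pv_A_mem _ hx1 d, pv_B_mem _ hx1 d]
      · -- x_k ≤ 0 and ¬D_: either contradiction or both return (k, 1, x_k, m_k)
        have hgle : (Int.gcd (PySem.Int.floordiv (p + (4 * k + 3)) 4) (4 * k + 3) : Int) ≤ 1 := by
          omega
        rcases eq_or_lt_of_le (by omega : PySem.Int.floordiv (p + (4 * k + 3)) 4 ≤ 0)
          with hx0' | hxneg
        · -- x_k = 0: the guards force m_k = -1, so D_ holds, contradiction
          exfalso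
          rw [hx0'] at hgle
          rw [Int.gcd_zero_left] at hgle
          have hm : 4 * k + 3 = -1 := by
            have : (4 * k + 3).natAbs ≤ 1 := by exact_mod_cast hgle
            omega
          exact hnD ⟨h4, by rw [hx0', Int.gcd_zero_left]; exact_mod_cast hgle,
            Or.inl ⟨hx0'.symm ▸ rfl, hm⟩⟩
        · -- x_k ≤ -1: ¬D_ forces 1 % m_k = target, both sides return d = 1
          have hx1' : PySem.Int.floordiv (p + (4 * k + 3)) 4 ≤ -1 := by omega
          have hm1 : PySem.Int.mod 1 (4 * k + 3) =
              PySem.Int.mod (-(PySem.Int.floordiv (p + (4 * k + 3)) 4)) (4 * k + 3) := by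
            by_contra hne
            exact hnD ⟨h4, hgle, Or.inr ⟨hx1', hne⟩⟩
          simp only [find_witness, find_witness_alt]
          rw [if_neg (not_not_intro h4), if_neg (not_not_intro h4), if_neg hg, if_neg hg]
          have hA : divisors_of_square (PySem.Int.floordiv (p + (4 * k + 3)) 4) = [1] :=
            pv_A_neg _ (by omega)
          rw [hA]
          have habs1 : (1:Int) ≤ |PySem.Int.floordiv (p + (4 * k + 3)) 4| := by
            rw [abs_of_neg (by omega)]; omega
          have hpred1 : (PySem.Int.mod 1 (4 * k + 3) ==
              PySem.Int.mod (-(PySem.Int.floordiv (p + (4 * k + 3)) 4)) (4 * k + 3)) = true := by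
            rw [beq_iff_eq]; exact hm1
          have hBfind : (PySem.List.sorted
            (PySem.Set.ofList
              ((PySem.Set.union
              (PySem.Set.ofList ((PySem.List.pyRange 1 ((isqrt (|PySem.Int.floordiv (p + (4 * k + 3)) 4|).toNat : Int) + 1) 1).filter
                (fun j => PySem.Int.mod (|PySem.Int.floordiv (p + (4 * k + 3)) 4|) j == 0)))
              (((PySem.List.pyRange 1 ((isqrt (|PySem.Int.floordiv (p + (4 * k + 3)) 4|).toNat : Int) + 1) 1).filter
                (fun j => PySem.Int.mod (|PySem.Int.floordiv (p + (4 * k + 3)) 4|) j == 0)).map (fun i => PySem.Int.floordiv (|PySem.Int.floordiv (p + (4 * k + 3)) 4|) i))).flatMap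
                (fun a => (PySem.Set.union
              (PySem.Set.ofList ((PySem.List.pyRange 1 ((isqrt (|PySem.Int.floordiv (p + (4 * k + 3)) 4|).toNat : Int) + 1) 1).filter
                (fun j => PySem.Int.mod (|PySem.Int.floordiv (p + (4 * k + 3)) 4|) j == 0)))
              (((PySem.List.pyRange 1 ((isqrt (|PySem.Int.floordiv (p + (4 * k + 3)) 4|).toNat : Int) + 1) 1).filter
                (fun j => PySem.Int.mod (|PySem.Int.floordiv (p + (4 * k + 3)) 4|) j == 0)).map (fun i => PySem.Int.floordiv (|PySem.Int.floordiv (p + (4 * k + 3)) 4|) i))).map (fun b => a * b))))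
            (fun x => x) false).find?
              (fun d => PySem.Int.mod d (4 * k + 3) ==
                PySem.Int.mod (-(PySem.Int.floordiv (p + (4 * k + 3)) 4)) (4 * k + 3)) = some 1 := by
            apply pv_find?_min (pv_B_sorted _)
            · exact (pv_B_mem _ habs1 1).mpr ⟨one_pos, one_dvd _⟩
            · exact hpred1
            · intro b hb _
              exact (pv_B_mem _ habs1 b).mp hb |>.1
          rw [hBfind]
          rw [List.find?_cons_of_pos (p := (fun d => PySem.Int.mod d (4 * k + 3) == PySem.Int.mod (-(PySem.Int.floordiv (p + (4 * k + 3)) 4)) (4 * k + 3))) hpred1]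
  
theorem pv_tight (p k : Int) (hD : D_find_witness p k) :
    find_witness p k ≠ find_witness_alt p k := by
  obtain ⟨h4, hgle, hcase⟩ := hD
  have hgne : ¬ (1 < (Int.gcd (PySem.Int.floordiv (p + (4 * k + 3)) 4) (4 * k + 3) : Int)) := by
    omega
  rcases hcase with ⟨hx0, hm⟩ | ⟨hx1, hne⟩
  · -- (p, k) = (1, -1): A returns (-1, 1, 0, -1), B returns none
    have hk : k = -1 := by omega
    have hp : p = 1 := by
      have heq := PySem.Int.floordiv_mul_add_mod (p + (4 * k + 3)) 4
      rw [hx0, h4] at heq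
      omega
    subst hk hp
    decide
  · -- x_k ≤ -1 with 1 % m_k ≠ target: A returns none, B finds a divisor (-x_k works)
    simp only [find_witness, find_witness_alt]
    rw [if_neg (not_not_intro h4), if_neg (not_not_intro h4), if_neg hgne, if_neg hgne]
    have hA : divisors_of_square (PySem.Int.floordiv (p + (4 * k + 3)) 4) = [1] :=
      pv_A_neg _ (by omega)
    rw [hA]
    have hpred1 : (PySem.Int.mod 1 (4 * k + 3) ==
        PySem.Int.mod (-(PySem.Int.floordiv (p + (4 * k + 3)) 4)) (4 * k + 3)) = false := by
      exact beq_false_of_ne hne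
    have hLnone : List.find? (fun d => PySem.Int.mod d (4 * k + 3) == PySem.Int.mod (-(PySem.Int.floordiv (p + (4 * k + 3)) 4)) (4 * k + 3)) [1] = none :=
      List.find?_eq_none.mpr (by
        intro x hx hcon
        obtain rfl := List.mem_singleton.mp hx
        exact absurd (beq_iff_eq.mp hcon) hne)
    rw [hLnone]
    have habs1 : (1:Int) ≤ |PySem.Int.floordiv (p + (4 * k + 3)) 4| := by
      rw [abs_of_neg (by omega)]; omega
    have hmem : -(PySem.Int.floordiv (p + (4 * k + 3)) 4) ∈ (PySem.List.sorted
            (PySem.Set.ofList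
              ((PySem.Set.union
              (PySem.Set.ofList ((PySem.List.pyRange 1 ((isqrt (|PySem.Int.floordiv (p + (4 * k + 3)) 4|).toNat : Int) + 1) 1).filter
                (fun j => PySem.Int.mod (|PySem.Int.floordiv (p + (4 * k + 3)) 4|) j == 0)))
              (((PySem.List.pyRange 1 ((isqrt (|PySem.Int.floordiv (p + (4 * k + 3)) 4|).toNat : Int) + 1) 1).filter
                (fun j => PySem.Int.mod (|PySem.Int.floordiv (p + (4 * k + 3)) 4|) j == 0)).map (fun i => PySem.Int.floordiv (|PySem.Int.floordiv (p + (4 * k + 3)) 4|) i))).flatMap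
                (fun a => (PySem.Set.union
              (PySem.Set.ofList ((PySem.List.pyRange 1 ((isqrt (|PySem.Int.floordiv (p + (4 * k + 3)) 4|).toNat : Int) + 1) 1).filter
                (fun j => PySem.Int.mod (|PySem.Int.floordiv (p + (4 * k + 3)) 4|) j == 0)))
              (((PySem.List.pyRange 1 ((isqrt (|PySem.Int.floordiv (p + (4 * k + 3)) 4|).toNat : Int) + 1) 1).filter
                (fun j => PySem.Int.mod (|PySem.Int.floordiv (p + (4 * k + 3)) 4|) j == 0)).map (fun i => PySem.Int.floordiv (|PySem.Int.floordiv (p + (4 * k + 3)) 4|) i))).map (fun b => a * b))))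
            (fun x => x) false) :=
      (pv_B_mem _ habs1 _).mpr ⟨by omega,
        ⟨-(PySem.Int.floordiv (p + (4 * k + 3)) 4), by
          rw [abs_of_neg (by omega : PySem.Int.floordiv (p + (4 * k + 3)) 4 < 0)]⟩⟩
    have hBsome : ((PySem.List.sorted
            (PySem.Set.ofList
              ((PySem.Set.union
              (PySem.Set.ofList ((PySem.List.pyRange 1 ((isqrt (|PySem.Int.floordiv (p + (4 * k + 3)) 4|).toNat : Int) + 1) 1).filter
                (fun j => PySem.Int.mod (|PySem.Int.floordiv (p + (4 * k + 3)) 4|) j == 0)))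
              (((PySem.List.pyRange 1 ((isqrt (|PySem.Int.floordiv (p + (4 * k + 3)) 4|).toNat : Int) + 1) 1).filter
                (fun j => PySem.Int.mod (|PySem.Int.floordiv (p + (4 * k + 3)) 4|) j == 0)).map (fun i => PySem.Int.floordiv (|PySem.Int.floordiv (p + (4 * k + 3)) 4|) i))).flatMap
                (fun a => (PySem.Set.union
              (PySem.Set.ofList ((PySem.List.pyRange 1 ((isqrt (|PySem.Int.floordiv (p + (4 * k + 3)) 4|).toNat : Int) + 1) 1).filter
                (fun j => PySem.Int.mod (|PySem.Int.floordiv (p + (4 * k + 3)) 4|) j == 0)))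
              (((PySem.List.pyRange 1 ((isqrt (|PySem.Int.floordiv (p + (4 * k + 3)) 4|).toNat : Int) + 1) 1).filter
                (fun j => PySem.Int.mod (|PySem.Int.floordiv (p + (4 * k + 3)) 4|) j == 0)).map (fun i => PySem.Int.floordiv (|PySem.Int.floordiv (p + (4 * k + 3)) 4|) i))).map (fun b => a * b))))
            (fun x => x) false).find?
        (fun d => PySem.Int.mod d (4 * k + 3) ==
          PySem.Int.mod (-(PySem.Int.floordiv (p + (4 * k + 3)) 4)) (4 * k + 3))).isSome := by
      rw [List.find?_isSome]
      exact ⟨_, hmem, by rw [beq_iff_eq]⟩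
    obtain ⟨a, ha⟩ := Option.isSome_iff_exists.mp hBsome
    rw [ha]
    simp

-- ===== VERDICT (by name: the statement is the Claim_ definition above) =====
theorem find_witness_spec : Claim_unchanged_find_witness := by
  intro p k _
  unfold Spec_find_witness
  intro hnD
  exact pv_main p k hnD
theorem find_witness_changed : Claim_changed_find_witness := by
  unfold Claim_changed_find_witness; decide
theorem find_witness_tight : Claim_exact_find_witness := by
  intro p k _ hD
  exact pv_tight p k hD
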